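-- pv_equiv track=rewrite | github.com/18maxsal/LeetCode-Problems | Arrays/Python Versions/CountGoodTriplets.py | optimizedSolution
-- ===== SOURCE A (Python) =====
-- from typing import List
--
-- def optimizedSolution(arr: List[int], a: int, b: int, c: int) -> int:
--     # NOTE: Solution copied from Leetcode's writeup on the optimized solution.
--     ans = 0
--     n = len(arr)
--     total = [0] * 1001
--     for j in range(n):
--         for k in range(j + 1, n):
--             if abs(arr[j] - arr[k]) <= b:
--                 lj, rj = arr[j] - a, arr[j] + a
--                 lk, rk = arr[k] - c, arr[k] + c
--                 l = max(0, lj, lk)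
--                 r = min(1000, rj, rk)
--                 if l <= r:
--                     ans += total[r] if l == 0 else total[r] - total[l - 1]
--         for k in range(arr[j], 1001):
--             total[k] += 1
--
--     return ans
-- ===== SOURCE B (Python) =====
-- from typing import List
--
-- def optimizedSolution(arr: List[int], a: int, b: int, c: int) -> int:
--     # Canonical brute force: scan all index triples i < j < k directly.
--     n = len(arr)
--     count = 0
--     for i in range(n):
--         for j in range(i + 1, n):
--             if abs(arr[i] - arr[j]) > a:
--                 continue
--             for k in range(j + 1, n):
--                 if abs(arr[j] - arr[k]) <= b and abs(arr[i] - arr[k]) <= c: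
--                     count += 1
--     return count
-- ===== Notes on version B (the rewrite author's own statement) =====
-- stated objective: simpler
-- what changed: Replaces A's prefix-count table over the value range [0,1000] (pair loop plus range queries on a running histogram) by the canonical triple-nested loop over index triples i<j<k that checks the three distance constraints directly.
-- outside the precondition, e.g. on optimizedSolution([1001, 1001, 1001], 5, 5, 5): A returns 0, B returns 1; on optimizedSolution([3, 2, -5, 0, 0, 3], 2, 8, 3): A returns 10, B returns 7
import Mathlib
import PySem

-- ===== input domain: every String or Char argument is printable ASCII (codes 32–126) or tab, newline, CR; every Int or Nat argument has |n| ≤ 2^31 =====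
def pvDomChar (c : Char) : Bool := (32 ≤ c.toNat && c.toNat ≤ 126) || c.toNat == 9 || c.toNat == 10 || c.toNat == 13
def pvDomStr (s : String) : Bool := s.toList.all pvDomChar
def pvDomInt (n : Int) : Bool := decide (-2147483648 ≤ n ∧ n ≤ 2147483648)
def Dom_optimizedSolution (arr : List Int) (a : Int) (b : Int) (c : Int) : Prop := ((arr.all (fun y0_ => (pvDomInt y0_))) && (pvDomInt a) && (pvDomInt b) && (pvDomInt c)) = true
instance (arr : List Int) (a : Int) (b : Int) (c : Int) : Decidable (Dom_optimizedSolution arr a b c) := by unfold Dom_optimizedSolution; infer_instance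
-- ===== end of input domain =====

-- B replaces A's value-indexed prefix-count table by the canonical direct scan of all
-- index triples i < j < k (simpler; not faster).

-- ===== PORT A =====
def optimizedSolution (arr : List Int) (a : Int) (b : Int) (c : Int) : Int :=
  let n : Int := (arr.length : Int)
  ((PySem.List.pyRange 0 n 1).foldl
    (fun (st : Int × List Int) (j : Int) =>
      let ansJ := (PySem.List.pyRange (j + 1) n 1).foldl
        (fun ans k =>
          if |PySem.List.pyGetD arr j 0 - PySem.List.pyGetD arr k 0| ≤ b then
            if max (max 0 (PySem.List.pyGetD arr j 0 - a)) (PySem.List.pyGetD arr k 0 - c) ≤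
               min (min 1000 (PySem.List.pyGetD arr j 0 + a)) (PySem.List.pyGetD arr k 0 + c) then
              ans +
                (if max (max 0 (PySem.List.pyGetD arr j 0 - a)) (PySem.List.pyGetD arr k 0 - c) = 0 then
                  PySem.List.pyGetD st.2
                    (min (min 1000 (PySem.List.pyGetD arr j 0 + a)) (PySem.List.pyGetD arr k 0 + c)) 0
                 else
                  PySem.List.pyGetD st.2
                    (min (min 1000 (PySem.List.pyGetD arr j 0 + a)) (PySem.List.pyGetD arr k 0 + c)) 0 -
                  PySem.List.pyGetD st.2
                    (max (max 0 (PySem.List.pyGetD arr j 0 - a)) (PySem.List.pyGetD arr k 0 - c) - 1) 0)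
            else ans
          else ans) st.1
      let totalJ := (PySem.List.pyRange (PySem.List.pyGetD arr j 0) 1001 1).foldl
        (fun t k => PySem.List.pySetD t k (PySem.List.pyGetD t k 0 + 1)) st.2
      (ansJ, totalJ))
    ((0 : Int), List.replicate 1001 (0 : Int))).1

-- ===== PORT B =====
def optimizedSolution_alt (arr : List Int) (a : Int) (b : Int) (c : Int) : Int :=
  let n : Int := (arr.length : Int)
  (PySem.List.pyRange 0 n 1).foldl
    (fun cnt i =>
      (PySem.List.pyRange (i + 1) n 1).foldl
        (fun cnt j =>
          if |PySem.List.pyGetD arr i 0 - PySem.List.pyGetD arr j 0| > a then cnt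
          else
            (PySem.List.pyRange (j + 1) n 1).foldl
              (fun cnt k =>
                if |PySem.List.pyGetD arr j 0 - PySem.List.pyGetD arr k 0| ≤ b ∧
                   |PySem.List.pyGetD arr i 0 - PySem.List.pyGetD arr k 0| ≤ c then cnt + 1
                else cnt) cnt) cnt)
    0

-- ===== PRECONDITION & SPEC =====
-- Pre_ excludes arrays with a value outside [0, 1000] (the problem's stated value range):
-- there A's fixed 1001-entry prefix table silently drops values above 1000, corrupts
-- counts via Python's negative-index wraparound, or raises IndexError.
def Pre_optimizedSolution (arr : List Int) (a : Int) (b : Int) (c : Int) : Prop :=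
  (arr.all (fun x => decide (0 ≤ x) && decide (x ≤ 1000))) = true
instance (arr : List Int) (a : Int) (b : Int) (c : Int) : Decidable (Pre_optimizedSolution arr a b c) := by
  unfold Pre_optimizedSolution; infer_instance
def pvWitness_optimizedSolution : List Int × Int × Int × Int := ([0, 500, 1000], 1000, 1000, 1000)

def Spec_optimizedSolution (arr : List Int) (a : Int) (b : Int) (c : Int) (out : Int) : Prop := out = optimizedSolution_alt arr a b c
instance (arr : List Int) (a : Int) (b : Int) (c : Int) (out : Int) : Decidable (Spec_optimizedSolution arr a b c out) := by unfold Spec_optimizedSolution; infer_instance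

-- ===== CLAIM (what is proved, stated in full; the proofs are below) =====
def Claim_equal_optimizedSolution : Prop := ∀ (arr : List Int) (a : Int) (b : Int) (c : Int), Dom_optimizedSolution arr a b c → Pre_optimizedSolution arr a b c → Spec_optimizedSolution arr a b c (optimizedSolution arr a b c)

-- ===== LEMMAS AND PROOFS =====

/-- Int-valued count of a Boolean predicate over a list (avoids Nat casts). -/
def icnt (p : Int → Bool) : List Int → Int
  | [] => 0
  | x :: xs => (if p x then 1 else 0) + icnt p xs

/-- Middle-grouped pair sum (B's spec shape): for each later z after y = head, count prefix. -/
def pairSum (a b c x : Int) : List Int → Int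
  | [] => 0
  | y :: rest =>
      (if |x - y| > a then 0
       else icnt (fun z => decide (|y - z| ≤ b) && decide (|x - z| ≤ c)) rest) +
      pairSum a b c x rest

def tripleSum (a b c : Int) : List Int → Int
  | [] => 0
  | x :: rest => pairSum a b c x rest + tripleSum a b c rest

def contrib (a b c : Int) (pfx : List Int) (y : Int) (rest : List Int) : Int :=
  (rest.map (fun z =>
    if |y - z| ≤ b then icnt (fun x => decide (|x - y| ≤ a) && decide (|x - z| ≤ c)) pfx
    else 0)).sum

def specLoop (a b c : Int) (pfx : List Int) : List Int → Int
  | [] => 0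
  | y :: rest => contrib a b c pfx y rest + specLoop a b c (pfx ++ [y]) rest

lemma icnt_congr {p q : Int → Bool} {xs : List Int} (h : ∀ x ∈ xs, p x = q x) :
    icnt p xs = icnt q xs := by
  induction xs with
  | nil => rfl
  | cons x xs ih =>
    simp only [icnt, h x (by simp)]
    rw [ih (fun x hx => h x (by simp [hx]))]

lemma icnt_false {p : Int → Bool} {xs : List Int} (h : ∀ x ∈ xs, p x = false) :
    icnt p xs = 0 := by
  induction xs with
  | nil => rfl
  | cons x xs ih => simp [icnt, h x (by simp), ih (fun x hx => h x (by simp [hx]))]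

-- a guarded 0/1 row-sum is an icnt
lemma row_sum (qb w : Int → Bool) (rest : List Int) :
    (rest.map (fun z => if qb z then (if w z then (1:Int) else 0) else 0)).sum
    = icnt (fun z => qb z && w z) rest := by
  induction rest with
  | nil => simp [icnt]
  | cons z rest ih =>
    simp only [List.map_cons, List.sum_cons, icnt, ih]
    by_cases hq : qb z = true <;> by_cases hw : w z = true <;> simp [hq, hw]

-- sum over rows equals sum over columns (double-count swap)
lemma swap_sum (pa qb : Int → Bool) (rc : Int → Int → Bool) (pfx rest : List Int) :
    (rest.map (fun z => if qb z then icnt (fun x => pa x && rc x z) pfx else 0)).sum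
    = (pfx.map (fun x => if pa x then icnt (fun z => qb z && rc x z) rest else 0)).sum := by
  induction pfx with
  | nil => simp [icnt]
  | cons x pfx ih =>
    have hrow : (rest.map (fun z => if qb z then (if (pa x && rc x z : Bool) then (1:Int) else 0) else 0)).sum
        = if pa x then icnt (fun z => qb z && rc x z) rest else 0 := by
      cases hpa : pa x with
      | false => simp only [hpa, Bool.false_and, if_false]; simp
      | true => simp only [hpa, Bool.true_and, if_true]; exact row_sum qb (fun z => rc x z) rest
    calc (rest.map (fun z => if qb z then icnt (fun x' => pa x' && rc x' z) (x :: pfx) else 0)).sum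
        = (rest.map (fun z =>
            (if qb z then (if (pa x && rc x z : Bool) then (1:Int) else 0) else 0) +
            (if qb z then icnt (fun x' => pa x' && rc x' z) pfx else 0))).sum := by
          apply congrArg List.sum
          apply List.map_congr_left
          intro z _
          by_cases hq : qb z = true <;> simp [hq, icnt]
      _ = (rest.map (fun z => if qb z then (if (pa x && rc x z : Bool) then (1:Int) else 0) else 0)).sum
          + (rest.map (fun z => if qb z then icnt (fun x' => pa x' && rc x' z) pfx else 0)).sum := by
          rw [← List.sum_map_add]
      _ = _ := by rw [hrow, ih]; simp

lemma specLoop_eq (a b c : Int) : ∀ (rest pfx : List Int),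
    specLoop a b c pfx rest
    = (pfx.map (fun x => pairSum a b c x rest)).sum + tripleSum a b c rest := by
  intro rest
  induction rest with
  | nil =>
    intro pfx
    have : (pfx.map (fun x => pairSum a b c x [])).sum = 0 := by
      induction pfx with
      | nil => simp
      | cons x pfx ih => simp [pairSum, ih]
    simp [specLoop, tripleSum, this]
  | cons y rest ih =>
    intro pfx
    have hswap := swap_sum (fun x => decide (|x - y| ≤ a)) (fun z => decide (|y - z| ≤ b))
      (fun x z => decide (|x - z| ≤ c)) pfx rest
    have hps : ∀ x : Int, pairSum a b c x (y :: rest)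
        = (if (decide (|x - y| ≤ a) : Bool) then icnt (fun z => decide (|y - z| ≤ b) && decide (|x - z| ≤ c)) rest else 0)
          + pairSum a b c x rest := by
      intro x
      show (if |x - y| > a then 0 else _) + _ = _
      congr 1
      by_cases h : |x - y| > a
      · simp [h, not_le.mpr h]
      · simp [h, not_lt.mp h]
    have hmapsplit : (pfx.map (fun x => pairSum a b c x (y :: rest))).sum
        = (pfx.map (fun x => if (decide (|x - y| ≤ a) : Bool) then icnt (fun z => decide (|y - z| ≤ b) && decide (|x - z| ≤ c)) rest else 0)).sum
          + (pfx.map (fun x => pairSum a b c x rest)).sum := by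
      rw [← List.sum_map_add]
      apply congrArg List.sum
      apply List.map_congr_left
      intro x _
      exact hps x
    show contrib a b c pfx y rest + specLoop a b c (pfx ++ [y]) rest = _
    rw [ih (pfx ++ [y])]
    show (rest.map (fun z => if |y - z| ≤ b then icnt (fun x => decide (|x - y| ≤ a) && decide (|x - z| ≤ c)) pfx else 0)).sum + _ = _
    have hc : (rest.map (fun z => if |y - z| ≤ b then icnt (fun x => decide (|x - y| ≤ a) && decide (|x - z| ≤ c)) pfx else 0)).sum
        = (rest.map (fun z => if (decide (|y - z| ≤ b) : Bool) then icnt (fun x => decide (|x - y| ≤ a) && decide (|x - z| ≤ c)) pfx else 0)).sum := by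
      apply congrArg List.sum; apply List.map_congr_left; intro z _; by_cases h : |y - z| ≤ b <;> simp [h]
    rw [hc, hswap]
    have : ((pfx ++ [y]).map (fun x => pairSum a b c x rest)).sum
        = (pfx.map (fun x => pairSum a b c x rest)).sum + pairSum a b c y rest := by simp
    rw [this, hmapsplit]
    simp only [tripleSum]
    ring

-- ===== B side =====
lemma foldl_count (b c u v : Int) : ∀ (xs : List Int) (cnt : Int),
    xs.foldl (fun cnt z => if |v - z| ≤ b ∧ |u - z| ≤ c then cnt + 1 else cnt) cnt
    = cnt + icnt (fun z => decide (|v - z| ≤ b) && decide (|u - z| ≤ c)) xs := by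
  intro xs
  induction xs with
  | nil => intro cnt; simp [icnt]
  | cons z xs ih =>
    intro cnt
    simp only [List.foldl_cons, icnt, ih]
    by_cases h1 : |v - z| ≤ b <;> by_cases h2 : |u - z| ≤ c <;> simp [h1, h2] <;> ring

lemma drop_succ_append (pfx rest : List Int) (y : Int) :
    (pfx ++ y :: rest).drop (pfx.length + 1) = rest := by
  have h : pfx ++ y :: rest = (pfx ++ [y]) ++ rest := by simp
  rw [h]
  have hl : (pfx ++ [y]).length = pfx.length + 1 := by simp
  rw [← hl, List.drop_left]

lemma getD_append_length (pfx rest : List Int) (y : Int) :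
    (pfx ++ y :: rest).getD pfx.length 0 = y := by
  simp [List.getD, List.getElem?_append_right (Nat.le_refl pfx.length)]

lemma B_jloop (arr : List Int) (a b c u : Int) : ∀ (rest pfx : List Int) (cnt : Int),
    arr = pfx ++ rest →
    (PySem.List.pyRange ((pfx.length : Int)) ((arr.length : Int)) 1).foldl
      (fun cnt j =>
        if |u - PySem.List.pyGetD arr j 0| > a then cnt
        else (PySem.List.pyRange (j + 1) ((arr.length : Int)) 1).foldl
          (fun cnt k =>
            if |PySem.List.pyGetD arr j 0 - PySem.List.pyGetD arr k 0| ≤ b ∧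
               |u - PySem.List.pyGetD arr k 0| ≤ c then cnt + 1 else cnt) cnt) cnt
    = cnt + pairSum a b c u rest := by
  intro rest
  induction rest with
  | nil =>
    intro pfx cnt harr
    have hl : (pfx.length : Int) = (arr.length : Int) := by rw [harr]; simp
    rw [hl, PySem.List.pyRange_one_eq_nil (le_refl _)]
    simp [pairSum]
  | cons y rest ih =>
    intro pfx cnt harr
    have hlt : (pfx.length : Int) < (arr.length : Int) := by rw [harr]; simp
    rw [PySem.List.pyRange_one_cons hlt]
    simp only [List.foldl_cons]
    have hy : PySem.List.pyGetD arr ((pfx.length : Int)) 0 = y := by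
      rw [PySem.List.pyGetD_natCast, harr, getD_append_length]
    rw [hy]
    have hk : ∀ cnt0 : Int, (PySem.List.pyRange ((pfx.length : Int) + 1) ((arr.length : Int)) 1).foldl
        (fun cnt k =>
          if |y - PySem.List.pyGetD arr k 0| ≤ b ∧ |u - PySem.List.pyGetD arr k 0| ≤ c then cnt + 1
          else cnt) cnt0
        = cnt0 + icnt (fun z => decide (|y - z| ≤ b) && decide (|u - z| ≤ c)) rest := by
      intro cnt0
      rw [PySem.List.foldl_pyRange_pyGetD' arr 0
        (fun cnt z => if |y - z| ≤ b ∧ |u - z| ≤ c then cnt + 1 else cnt) cnt0 (by positivity)]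
      have hdrop : arr.drop ((pfx.length : Int) + 1).toNat = rest := by
        have : ((pfx.length : Int) + 1).toNat = pfx.length + 1 := by omega
        rw [this, harr, drop_succ_append]
      rw [hdrop, foldl_count]
    have hcast : (pfx.length : Int) + 1 = (((pfx ++ [y]).length : Nat) : Int) := by simp
    have harr' : arr = (pfx ++ [y]) ++ rest := by simp [harr]
    by_cases hcond : |u - y| > a
    · rw [if_pos hcond, hcast, ih (pfx ++ [y]) cnt harr']
      simp [pairSum, hcond]
    · rw [if_neg hcond, hk cnt, hcast, ih (pfx ++ [y]) _ harr']
      simp only [pairSum]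
      rw [if_neg hcond]
      ring

lemma B_iloop (arr : List Int) (a b c : Int) : ∀ (rest pfx : List Int) (cnt : Int),
    arr = pfx ++ rest →
    (PySem.List.pyRange ((pfx.length : Int)) ((arr.length : Int)) 1).foldl
      (fun cnt i =>
        (PySem.List.pyRange (i + 1) ((arr.length : Int)) 1).foldl
          (fun cnt j =>
            if |PySem.List.pyGetD arr i 0 - PySem.List.pyGetD arr j 0| > a then cnt
            else (PySem.List.pyRange (j + 1) ((arr.length : Int)) 1).foldl
              (fun cnt k =>
                if |PySem.List.pyGetD arr j 0 - PySem.List.pyGetD arr k 0| ≤ b ∧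
                   |PySem.List.pyGetD arr i 0 - PySem.List.pyGetD arr k 0| ≤ c then cnt + 1
                else cnt) cnt) cnt) cnt
    = cnt + tripleSum a b c rest := by
  intro rest
  induction rest with
  | nil =>
    intro pfx cnt harr
    have hl : (pfx.length : Int) = (arr.length : Int) := by rw [harr]; simp
    rw [hl, PySem.List.pyRange_one_eq_nil (le_refl _)]
    simp [tripleSum]
  | cons x rest ih =>
    intro pfx cnt harr
    have hlt : (pfx.length : Int) < (arr.length : Int) := by rw [harr]; simp
    rw [PySem.List.pyRange_one_cons hlt]
    simp only [List.foldl_cons]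
    have hx : PySem.List.pyGetD arr ((pfx.length : Int)) 0 = x := by
      rw [PySem.List.pyGetD_natCast, harr, getD_append_length]
    rw [hx]
    have hcast : (pfx.length : Int) + 1 = (((pfx ++ [x]).length : Nat) : Int) := by simp
    have harr' : arr = (pfx ++ [x]) ++ rest := by simp [harr]
    rw [hcast, B_jloop arr a b c x rest (pfx ++ [x]) cnt harr',
        ih (pfx ++ [x]) _ harr']
    simp only [tripleSum]
    ring

lemma B_eq_tripleSum (arr : List Int) (a b c : Int) :
    optimizedSolution_alt arr a b c = tripleSum a b c arr := by
  have h := B_iloop arr a b c arr [] 0 (by simp)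
  simp only [List.length_nil, Nat.cast_zero, zero_add] at h
  simp only [optimizedSolution_alt]
  rw [h]

-- ===== A side =====
def stepT (t : List Int) (x : Int) : List Int :=
  (PySem.List.pyRange x 1001 1).foldl
    (fun t k => PySem.List.pySetD t k (PySem.List.pyGetD t k 0 + 1)) t

def buildTotal (pfx : List Int) : List Int := pfx.foldl stepT (List.replicate 1001 0)

def stepA (arr : List Int) (a b c : Int) (st : Int × List Int) (j : Int) : Int × List Int :=
  let n : Int := (arr.length : Int)
  let ansJ := (PySem.List.pyRange (j + 1) n 1).foldl
    (fun ans k =>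
      if |PySem.List.pyGetD arr j 0 - PySem.List.pyGetD arr k 0| ≤ b then
        if max (max 0 (PySem.List.pyGetD arr j 0 - a)) (PySem.List.pyGetD arr k 0 - c) ≤
           min (min 1000 (PySem.List.pyGetD arr j 0 + a)) (PySem.List.pyGetD arr k 0 + c) then
          ans +
            (if max (max 0 (PySem.List.pyGetD arr j 0 - a)) (PySem.List.pyGetD arr k 0 - c) = 0 then
              PySem.List.pyGetD st.2
                (min (min 1000 (PySem.List.pyGetD arr j 0 + a)) (PySem.List.pyGetD arr k 0 + c)) 0
             else
              PySem.List.pyGetD st.2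
                (min (min 1000 (PySem.List.pyGetD arr j 0 + a)) (PySem.List.pyGetD arr k 0 + c)) 0 -
              PySem.List.pyGetD st.2
                (max (max 0 (PySem.List.pyGetD arr j 0 - a)) (PySem.List.pyGetD arr k 0 - c) - 1) 0)
        else ans
      else ans) st.1
  let totalJ := (PySem.List.pyRange (PySem.List.pyGetD arr j 0) 1001 1).foldl
    (fun t k => PySem.List.pySetD t k (PySem.List.pyGetD t k 0 + 1)) st.2
  (ansJ, totalJ)

lemma A_as_stepA (arr : List Int) (a b c : Int) :
    optimizedSolution arr a b c
    = ((PySem.List.pyRange 0 ((arr.length : Int)) 1).foldl (stepA arr a b c)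
        ((0 : Int), List.replicate 1001 (0 : Int))).1 := rfl

lemma get_set (t : List Int) (i v w : Int) (hi0 : 0 ≤ i) (hi : i < (t.length : Int))
    (hv0 : 0 ≤ v) (hv : v < (t.length : Int)) :
    PySem.List.pyGetD (PySem.List.pySetD t i w) v 0 = if v = i then w else PySem.List.pyGetD t v 0 := by
  rw [PySem.List.pySetD_of_nonneg t w hi0]
  rw [PySem.List.pyGetD_eq_getElem _ _ hv0 (by simpa using hv),
      PySem.List.pyGetD_eq_getElem _ _ hv0 hv]
  rw [List.getElem_set]
  by_cases hvi : v = i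
  · simp [hvi]
  · have : ¬ (i.toNat = v.toNat) := by omega
    simp [this, hvi]

lemma length_foldl_incr : ∀ (ks : List Int) (t : List Int),
    ((ks.foldl (fun t k => PySem.List.pySetD t k (PySem.List.pyGetD t k 0 + 1)) t)).length = t.length := by
  intro ks
  induction ks with
  | nil => intro t; rfl
  | cons k ks ih => intro t; simp [List.foldl_cons, ih, PySem.List.length_pySetD]

lemma incrRange_get (m : Nat) : ∀ (lo : Int) (t : List Int) (v : Int),
    (1001 - lo).toNat = m → t.length = 1001 → 0 ≤ lo → 0 ≤ v → v ≤ 1000 →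
    PySem.List.pyGetD
      ((PySem.List.pyRange lo 1001 1).foldl
        (fun t k => PySem.List.pySetD t k (PySem.List.pyGetD t k 0 + 1)) t) v 0
    = PySem.List.pyGetD t v 0 + (if lo ≤ v then 1 else 0) := by
  induction m with
  | zero =>
    intro lo t v hm hlen _ _ hv1
    have hge : (1001 : Int) ≤ lo := by omega
    rw [PySem.List.pyRange_one_eq_nil hge]
    have : ¬ (lo ≤ v) := by omega
    simp [this]
  | succ m ih =>
    intro lo t v hm hlen hlo hv0 hv1
    have hlt : lo < 1001 := by omega
    rw [PySem.List.pyRange_one_cons hlt]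
    simp only [List.foldl_cons]
    rw [ih (lo + 1) _ v (by omega) (by rw [PySem.List.length_pySetD, hlen]) (by omega) hv0 hv1]
    rw [get_set t lo v _ hlo (by omega) hv0 (by omega)]
    by_cases hveq : v = lo
    · have h1 : lo ≤ v := by omega
      have h2 : ¬ (lo + 1 ≤ v) := by omega
      rw [if_pos hveq, if_pos h1, if_neg h2]
      have : PySem.List.pyGetD t lo 0 = PySem.List.pyGetD t v 0 := by rw [hveq]
      omega
    · rw [if_neg hveq]
      by_cases hle : lo + 1 ≤ v
      · rw [if_pos hle, if_pos (by omega)]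
      · rw [if_neg hle, if_neg (by omega)]

lemma stepT_get (t : List Int) (x v : Int) (hlen : t.length = 1001) (hx : 0 ≤ x)
    (hv0 : 0 ≤ v) (hv1 : v ≤ 1000) :
    PySem.List.pyGetD (stepT t x) v 0 = PySem.List.pyGetD t v 0 + (if x ≤ v then 1 else 0) := by
  exact incrRange_get (1001 - x).toNat x t v rfl hlen hx hv0 hv1

lemma length_stepT (t : List Int) (x : Int) : (stepT t x).length = t.length := by
  simp [stepT, length_foldl_incr]

lemma build_aux : ∀ (pfx : List Int) (t : List Int) (v : Int), t.length = 1001 →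
    (∀ x ∈ pfx, 0 ≤ x ∧ x ≤ 1000) → 0 ≤ v → v ≤ 1000 →
    PySem.List.pyGetD (pfx.foldl stepT t) v 0
    = PySem.List.pyGetD t v 0 + icnt (fun x => decide (x ≤ v)) pfx := by
  intro pfx
  induction pfx with
  | nil => intro t v _ _ _ _; simp [icnt]
  | cons x pfx ih =>
    intro t v hlen hall hv0 hv1
    simp only [List.foldl_cons, icnt]
    rw [ih (stepT t x) v (by rw [length_stepT, hlen]) (fun x hx => hall x (by simp [hx])) hv0 hv1]
    rw [stepT_get t x v hlen (hall x (by simp)).1 hv0 hv1]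
    by_cases hxv : x ≤ v
    · simp [hxv]; ring
    · simp [hxv]

lemma buildTotal_get (pfx : List Int) (v : Int) (hall : ∀ x ∈ pfx, 0 ≤ x ∧ x ≤ 1000)
    (hv0 : 0 ≤ v) (hv1 : v ≤ 1000) :
    PySem.List.pyGetD (buildTotal pfx) v 0 = icnt (fun x => decide (x ≤ v)) pfx := by
  unfold buildTotal
  rw [build_aux pfx _ v (by rw [List.length_replicate]) hall hv0 hv1]
  have : PySem.List.pyGetD (List.replicate 1001 (0 : Int)) v 0 = 0 := by
    rw [PySem.List.pyGetD_eq_getElem _ _ hv0 (by rw [List.length_replicate]; omega)]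
    rw [List.getElem_replicate]
  omega

lemma buildTotal_append (pfx : List Int) (y : Int) :
    buildTotal (pfx ++ [y]) = stepT (buildTotal pfx) y := by
  unfold buildTotal
  rw [List.foldl_append, List.foldl_cons, List.foldl_nil]

lemma icnt_sub (l r : Int) (hlr : l ≤ r) : ∀ pfx : List Int,
    icnt (fun x => decide (x ≤ r)) pfx - icnt (fun x => decide (x ≤ l - 1)) pfx
    = icnt (fun x => decide (l ≤ x ∧ x ≤ r)) pfx := by
  intro pfx
  induction pfx with
  | nil => simp [icnt]
  | cons x pfx ih =>
    simp only [icnt, decide_eq_true_eq]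
    split_ifs <;> omega

lemma query_eq (a b c : Int) (pfx : List Int) (y z : Int)
    (hall : ∀ x ∈ pfx, 0 ≤ x ∧ x ≤ 1000)
    (hy : 0 ≤ y ∧ y ≤ 1000) (hz : 0 ≤ z ∧ z ≤ 1000) :
    (if max (max 0 (y - a)) (z - c) ≤ min (min 1000 (y + a)) (z + c) then
      (if max (max 0 (y - a)) (z - c) = 0 then
        PySem.List.pyGetD (buildTotal pfx) (min (min 1000 (y + a)) (z + c)) 0
       else
        PySem.List.pyGetD (buildTotal pfx) (min (min 1000 (y + a)) (z + c)) 0 -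
        PySem.List.pyGetD (buildTotal pfx) (max (max 0 (y - a)) (z - c) - 1) 0)
     else 0)
    = icnt (fun x => decide (|x - y| ≤ a) && decide (|x - z| ≤ c)) pfx := by
  set l := max (max 0 (y - a)) (z - c) with hl
  set r := min (min 1000 (y + a)) (z + c) with hr
  have hl0 : 0 ≤ l := by rw [hl]; exact le_trans (le_max_left 0 (y - a)) (le_max_left _ _)
  have l1 : y - a ≤ l := by rw [hl]; exact le_trans (le_max_right 0 (y - a)) (le_max_left _ _)
  have l2 : z - c ≤ l := by rw [hl]; exact le_max_right _ _
  have r1 : r ≤ 1000 := by rw [hr]; exact le_trans (min_le_left _ _) (min_le_left _ _)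
  have r2 : r ≤ y + a := by rw [hr]; exact le_trans (min_le_left _ _) (min_le_right _ _)
  have r3 : r ≤ z + c := by rw [hr]; exact min_le_right _ _
  have lub : ∀ x : Int, 0 ≤ x → y - a ≤ x → z - c ≤ x → l ≤ x := by
    intro x h0 h1 h2; rw [hl]; exact max_le (max_le h0 h1) h2
  have rlb : ∀ x : Int, x ≤ 1000 → x ≤ y + a → x ≤ z + c → x ≤ r := by
    intro x h0 h1 h2; rw [hr]; exact le_min (le_min h0 h1) h2
  by_cases hlr : l ≤ r
  · rw [if_pos hlr]
    by_cases hl00 : l = 0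
    · rw [if_pos hl00]
      rw [buildTotal_get pfx r hall (by omega) r1]
      apply icnt_congr
      intro x hx
      have hxb := hall x hx
      have heq : (x ≤ r) ↔ (|x - y| ≤ a ∧ |x - z| ≤ c) := by
        rw [abs_le, abs_le]
        constructor
        · intro hxr; exact ⟨⟨by omega, by omega⟩, ⟨by omega, by omega⟩⟩
        · intro hcond; exact rlb x (by omega) (by omega) (by omega)
      simp [heq]
    · rw [if_neg hl00]
      rw [buildTotal_get pfx r hall (by omega) r1,
          buildTotal_get pfx (l - 1) hall (by omega) (by omega)]
      rw [icnt_sub l r hlr pfx]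
      apply icnt_congr
      intro x hx
      have hxb := hall x hx
      have heq : (l ≤ x ∧ x ≤ r) ↔ (|x - y| ≤ a ∧ |x - z| ≤ c) := by
        rw [abs_le, abs_le]
        constructor
        · intro hc; exact ⟨⟨by omega, by omega⟩, ⟨by omega, by omega⟩⟩
        · intro hc; exact ⟨lub x (by omega) (by omega) (by omega),
            rlb x (by omega) (by omega) (by omega)⟩
      simp [heq]
  · rw [if_neg hlr]
    symm
    apply icnt_false
    intro x hx
    have hxb := hall x hx
    by_cases h1 : |x - y| ≤ a
    · by_cases h2 : |x - z| ≤ c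
      · exfalso
        rw [abs_le] at h1 h2
        exact absurd (le_trans (lub x (by omega) (by omega) (by omega))
          (rlb x (by omega) (by omega) (by omega))) hlr
      · simp [h2]
    · simp [h1]

lemma A_loop (arr : List Int) (a b c : Int) (h : ∀ x ∈ arr, 0 ≤ x ∧ x ≤ 1000) :
    ∀ (rest pfx : List Int) (ans0 : Int), arr = pfx ++ rest →
    ((PySem.List.pyRange ((pfx.length : Int)) ((arr.length : Int)) 1).foldl (stepA arr a b c)
      (ans0, buildTotal pfx)).1
    = ans0 + specLoop a b c pfx rest := by
  intro rest
  induction rest with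
  | nil =>
    intro pfx ans0 harr
    have hl : (pfx.length : Int) = (arr.length : Int) := by rw [harr]; simp
    rw [hl, PySem.List.pyRange_one_eq_nil (le_refl _)]
    simp [specLoop]
  | cons y rest ih =>
    intro pfx ans0 harr
    have hlt : (pfx.length : Int) < (arr.length : Int) := by rw [harr]; simp
    rw [PySem.List.pyRange_one_cons hlt]
    simp only [List.foldl_cons]
    have hy : PySem.List.pyGetD arr ((pfx.length : Int)) 0 = y := by
      rw [PySem.List.pyGetD_natCast, harr, getD_append_length]
    have hyb : 0 ≤ y ∧ y ≤ 1000 := h y (by rw [harr]; simp)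
    have hallpfx : ∀ x ∈ pfx, 0 ≤ x ∧ x ≤ 1000 := fun x hx => h x (by rw [harr]; simp [hx])
    have hallrest : ∀ x ∈ rest, 0 ≤ x ∧ x ≤ 1000 := fun x hx => h x (by rw [harr]; simp [hx])
    have hstep : stepA arr a b c (ans0, buildTotal pfx) ((pfx.length : Int))
        = (ans0 + contrib a b c pfx y rest, buildTotal (pfx ++ [y])) := by
      simp only [stepA, hy, Prod.mk.injEq]
      constructor
      · -- ans component
        rw [PySem.List.foldl_pyRange_pyGetD' arr 0
          (fun ans z =>
            if |y - z| ≤ b then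
              if max (max 0 (y - a)) (z - c) ≤ min (min 1000 (y + a)) (z + c) then
                ans +
                  (if max (max 0 (y - a)) (z - c) = 0 then
                    PySem.List.pyGetD (buildTotal pfx) (min (min 1000 (y + a)) (z + c)) 0
                   else
                    PySem.List.pyGetD (buildTotal pfx) (min (min 1000 (y + a)) (z + c)) 0 -
                    PySem.List.pyGetD (buildTotal pfx) (max (max 0 (y - a)) (z - c) - 1) 0)
              else ans
            else ans) ans0 (by positivity)]
        have hdrop : arr.drop ((pfx.length : Int) + 1).toNat = rest := by
          have : ((pfx.length : Int) + 1).toNat = pfx.length + 1 := by omega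
          rw [this, harr, drop_succ_append]
        rw [hdrop]
        have hfun : (fun (ans : Int) (z : Int) =>
            if |y - z| ≤ b then
              if max (max 0 (y - a)) (z - c) ≤ min (min 1000 (y + a)) (z + c) then
                ans +
                  (if max (max 0 (y - a)) (z - c) = 0 then
                    PySem.List.pyGetD (buildTotal pfx) (min (min 1000 (y + a)) (z + c)) 0
                   else
                    PySem.List.pyGetD (buildTotal pfx) (min (min 1000 (y + a)) (z + c)) 0 -
                    PySem.List.pyGetD (buildTotal pfx) (max (max 0 (y - a)) (z - c) - 1) 0)
              else ans
            else ans)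
            = fun (ans : Int) (z : Int) => ans +
              (if |y - z| ≤ b then
                if max (max 0 (y - a)) (z - c) ≤ min (min 1000 (y + a)) (z + c) then
                  (if max (max 0 (y - a)) (z - c) = 0 then
                    PySem.List.pyGetD (buildTotal pfx) (min (min 1000 (y + a)) (z + c)) 0
                   else
                    PySem.List.pyGetD (buildTotal pfx) (min (min 1000 (y + a)) (z + c)) 0 -
                    PySem.List.pyGetD (buildTotal pfx) (max (max 0 (y - a)) (z - c) - 1) 0)
                else 0
              else 0) := by
          funext ans z
          split_ifs <;> ring
        rw [hfun, PySem.List.foldl_add]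
        congr 1
        unfold contrib
        apply congrArg List.sum
        apply List.map_congr_left
        intro z hz
        by_cases hcb : |y - z| ≤ b
        · rw [if_pos hcb, if_pos hcb]
          exact query_eq a b c pfx y z hallpfx hyb (hallrest z hz)
        · rw [if_neg hcb, if_neg hcb]
      · -- total component
        rw [buildTotal_append]
        rfl
    rw [hstep]
    have hcast : (pfx.length : Int) + 1 = (((pfx ++ [y]).length : Nat) : Int) := by simp
    have harr' : arr = (pfx ++ [y]) ++ rest := by simp [harr]
    rw [hcast, ih (pfx ++ [y]) _ harr']
    simp only [specLoop]
    ring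

lemma A_eq_specLoop (arr : List Int) (a b c : Int)
    (h : ∀ x ∈ arr, 0 ≤ x ∧ x ≤ 1000) :
    optimizedSolution arr a b c = specLoop a b c [] arr := by
  rw [A_as_stepA]
  have hb : List.replicate 1001 (0 : Int) = buildTotal [] := rfl
  have h0 : (0 : Int) = ((([] : List Int).length : Nat) : Int) := by simp
  rw [hb]
  have := A_loop arr a b c h arr [] 0 (by simp)
  simp only [List.length_nil, Nat.cast_zero, zero_add] at this
  rw [this]

-- ===== VERDICT (by name: the statement is the Claim_ definition above) =====
theorem optimizedSolution_spec : Claim_equal_optimizedSolution := by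
  intro arr a b c _hDom hPre
  have hPre' : ∀ x ∈ arr, 0 ≤ x ∧ x ≤ 1000 := by
    intro x hx
    have := List.all_eq_true.mp hPre x hx
    simp only [Bool.and_eq_true, decide_eq_true_eq] at this
    exact this
  unfold Spec_optimizedSolution
  rw [A_eq_specLoop arr a b c hPre', B_eq_tripleSum arr a b c, specLoop_eq]
  simp
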